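-- pv_equiv track=rewrite | github.com/lipeamarok/ghost-wallet-hunter | backend/utils/validators.py | validate_solana_address
-- ===== SOURCE A (Python) =====
-- def validate_solana_address(address: str) -> bool:
--     """
--     Validate Solana wallet address format.
--
--     Args:
--         address: The wallet address to validate
--
--     Returns:
--         bool: True if valid, False otherwise
--     """
--     try:
--         if not address or not isinstance(address, str):
--             return False
--
--         # Solana addresses are base58 encoded and typically 32-44 characters
--         if len(address) < 32 or len(address) > 44:
--             return False
--
--         # Check if it contains only valid base58 characters
--         valid_chars = "123456789ABCDEFGHJKLMNPQRSTUVWXYZabcdefghijkmnopqrstuvwxyz"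
--         if not all(c in valid_chars for c in address):
--             return False
--
--         return True
--
--     except Exception:
--         return False
-- ===== SOURCE B (Python) =====
-- import re
--
-- # One anchored regex: base58 alphabet (no 0, I, O, l), length 32-44.
-- _SOLANA_ADDRESS_RE = re.compile(r'[1-9A-HJ-NP-Za-km-z]{32,44}\Z')
--
--
-- def validate_solana_address(address: str) -> bool:
--     """
--     Validate Solana wallet address format.
--
--     Args:
--         address: The wallet address to validate
--
--     Returns:
--         bool: True if valid, False otherwise
--     """
--     if not address or not isinstance(address, str):
--         return False
--     return _SOLANA_ADDRESS_RE.match(address) is not None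
-- ===== Notes on version B (the rewrite author's own statement) =====
-- stated objective: idiomatic
-- what changed: Replaces the explicit length bounds and the per-character scan over a 58-character alphabet string with a single precompiled anchored regex whose character-class ranges encode the base58 alphabet and whose {32,44} quantifier encodes the length bounds.
import Mathlib
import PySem

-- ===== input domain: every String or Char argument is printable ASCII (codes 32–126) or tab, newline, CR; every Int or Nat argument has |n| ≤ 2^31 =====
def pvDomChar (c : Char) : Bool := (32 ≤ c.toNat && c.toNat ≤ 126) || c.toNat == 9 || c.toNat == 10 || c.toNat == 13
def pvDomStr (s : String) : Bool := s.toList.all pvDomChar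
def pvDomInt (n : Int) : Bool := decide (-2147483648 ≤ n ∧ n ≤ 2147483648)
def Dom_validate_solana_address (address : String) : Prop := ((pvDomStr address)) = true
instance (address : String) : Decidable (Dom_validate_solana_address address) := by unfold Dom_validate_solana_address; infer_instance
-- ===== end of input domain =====

-- B replaces A's explicit length bounds and per-character alphabet-string scan with a
-- single anchored regex (ported as its character-class range tests + length quantifier).

-- ===== PORT A =====
-- the characters of A's valid_chars string constant
def pvValidChars : List Char := ['1', '2', '3', '4', '5', '6', '7', '8', '9', 'A', 'B', 'C', 'D', 'E', 'F', 'G', 'H', 'J', 'K', 'L', 'M', 'N', 'P', 'Q', 'R', 'S', 'T', 'U', 'V', 'W', 'X', 'Y', 'Z', 'a', 'b', 'c', 'd', 'e', 'f', 'g', 'h', 'i', 'j', 'k', 'm', 'n', 'o', 'p', 'q', 'r', 's', 't', 'u', 'v', 'w', 'x', 'y', 'z']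

def validate_solana_address (address : String) : Bool :=
  -- if not address: return False  (a non-empty string is truthy; isinstance is True here)
  if address.toList = [] then false
  -- if len(address) < 32 or len(address) > 44: return False
  else if PySem.Str.len address < 32 || PySem.Str.len address > 44 then false
  -- if not all(c in valid_chars for c in address): return False
  else if !(address.toList.all (fun c => pvValidChars.contains c)) then false
  else true

-- ===== PORT B =====
-- Exact port of the compiled regex r'[1-9A-HJ-NP-Za-km-z]{32,44}\Z' applied with match():
-- the character class as its range tests, the quantifier + \Z anchor as the length bounds.
def pvB58Class (c : Char) : Bool :=
  ('1' ≤ c && c ≤ '9') || ('A' ≤ c && c ≤ 'H') || ('J' ≤ c && c ≤ 'N') ||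
  ('P' ≤ c && c ≤ 'Z') || ('a' ≤ c && c ≤ 'k') || ('m' ≤ c && c ≤ 'z')

def validate_solana_address_alt (address : String) : Bool :=
  if address.toList = [] then false
  else
    decide (32 ≤ address.toList.length) && decide (address.toList.length ≤ 44)
      && address.toList.all pvB58Class

-- ===== PRECONDITION & SPEC =====
def Spec_validate_solana_address (address : String) (out : Bool) : Prop := out = validate_solana_address_alt address
instance (address : String) (out : Bool) : Decidable (Spec_validate_solana_address address out) := by unfold Spec_validate_solana_address; infer_instance

-- ===== CLAIM (what is proved, stated in full; the proofs are below) =====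
def Claim_equal_validate_solana_address : Prop := ∀ (address : String), Dom_validate_solana_address address → Spec_validate_solana_address address (validate_solana_address address)

-- ===== LEMMAS AND PROOFS =====

-- A's alphabet membership coincides with B's character-class ranges, for every character.
theorem pvChar_mem_eq (c : Char) : pvValidChars.contains c = pvB58Class c := by
  rw [Bool.eq_iff_iff]
  simp only [pvValidChars, pvB58Class, List.contains_eq_mem, Bool.or_eq_true,
    Bool.and_eq_true, decide_eq_true_eq,
    List.mem_cons, List.not_mem_nil, or_false, Char.ext_iff, Char.le_def,
    UInt32.le_iff_toNat_le, ← UInt32.toNat_inj]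
  have h0 : ('1':Char).val.toNat = 49 := rfl
  have h1 : ('2':Char).val.toNat = 50 := rfl
  have h2 : ('3':Char).val.toNat = 51 := rfl
  have h3 : ('4':Char).val.toNat = 52 := rfl
  have h4 : ('5':Char).val.toNat = 53 := rfl
  have h5 : ('6':Char).val.toNat = 54 := rfl
  have h6 : ('7':Char).val.toNat = 55 := rfl
  have h7 : ('8':Char).val.toNat = 56 := rfl
  have h8 : ('9':Char).val.toNat = 57 := rfl
  have h9 : ('A':Char).val.toNat = 65 := rfl
  have h10 : ('B':Char).val.toNat = 66 := rfl
  have h11 : ('C':Char).val.toNat = 67 := rfl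
  have h12 : ('D':Char).val.toNat = 68 := rfl
  have h13 : ('E':Char).val.toNat = 69 := rfl
  have h14 : ('F':Char).val.toNat = 70 := rfl
  have h15 : ('G':Char).val.toNat = 71 := rfl
  have h16 : ('H':Char).val.toNat = 72 := rfl
  have h17 : ('J':Char).val.toNat = 74 := rfl
  have h18 : ('K':Char).val.toNat = 75 := rfl
  have h19 : ('L':Char).val.toNat = 76 := rfl
  have h20 : ('M':Char).val.toNat = 77 := rfl
  have h21 : ('N':Char).val.toNat = 78 := rfl
  have h22 : ('P':Char).val.toNat = 80 := rfl
  have h23 : ('Q':Char).val.toNat = 81 := rfl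
  have h24 : ('R':Char).val.toNat = 82 := rfl
  have h25 : ('S':Char).val.toNat = 83 := rfl
  have h26 : ('T':Char).val.toNat = 84 := rfl
  have h27 : ('U':Char).val.toNat = 85 := rfl
  have h28 : ('V':Char).val.toNat = 86 := rfl
  have h29 : ('W':Char).val.toNat = 87 := rfl
  have h30 : ('X':Char).val.toNat = 88 := rfl
  have h31 : ('Y':Char).val.toNat = 89 := rfl
  have h32 : ('Z':Char).val.toNat = 90 := rfl
  have h33 : ('a':Char).val.toNat = 97 := rfl
  have h34 : ('b':Char).val.toNat = 98 := rfl
  have h35 : ('c':Char).val.toNat = 99 := rfl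
  have h36 : ('d':Char).val.toNat = 100 := rfl
  have h37 : ('e':Char).val.toNat = 101 := rfl
  have h38 : ('f':Char).val.toNat = 102 := rfl
  have h39 : ('g':Char).val.toNat = 103 := rfl
  have h40 : ('h':Char).val.toNat = 104 := rfl
  have h41 : ('i':Char).val.toNat = 105 := rfl
  have h42 : ('j':Char).val.toNat = 106 := rfl
  have h43 : ('k':Char).val.toNat = 107 := rfl
  have h44 : ('m':Char).val.toNat = 109 := rfl
  have h45 : ('n':Char).val.toNat = 110 := rfl
  have h46 : ('o':Char).val.toNat = 111 := rfl
  have h47 : ('p':Char).val.toNat = 112 := rfl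
  have h48 : ('q':Char).val.toNat = 113 := rfl
  have h49 : ('r':Char).val.toNat = 114 := rfl
  have h50 : ('s':Char).val.toNat = 115 := rfl
  have h51 : ('t':Char).val.toNat = 116 := rfl
  have h52 : ('u':Char).val.toNat = 117 := rfl
  have h53 : ('v':Char).val.toNat = 118 := rfl
  have h54 : ('w':Char).val.toNat = 119 := rfl
  have h55 : ('x':Char).val.toNat = 120 := rfl
  have h56 : ('y':Char).val.toNat = 121 := rfl
  have h57 : ('z':Char).val.toNat = 122 := rfl
  rw [h0, h1, h2, h3, h4, h5, h6, h7, h8, h9, h10, h11, h12, h13, h14, h15, h16, h17, h18, h19, h20, h21, h22, h23, h24, h25, h26, h27, h28, h29, h30, h31, h32, h33, h34, h35, h36, h37, h38, h39, h40, h41, h42, h43, h44, h45, h46, h47, h48, h49, h50, h51, h52, h53, h54, h55, h56, h57]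
  omega

-- ===== VERDICT (by name: the statement is the Claim_ definition above) =====
theorem validate_solana_address_spec : Claim_equal_validate_solana_address := by
  intro address _
  unfold Spec_validate_solana_address validate_solana_address validate_solana_address_alt
  have hall : address.toList.all (fun c => pvValidChars.contains c)
      = address.toList.all pvB58Class := by
    simp only [pvChar_mem_eq]
  simp only [PySem.Str.len_eq, hall]
  by_cases hnil : address.toList = []
  · simp [hnil]
  · simp only [if_neg hnil]
    rcases hb : address.toList.all pvB58Class <;>
      by_cases h1 : (address.toList.length : Int) < 32 <;>
        by_cases h2 : (address.toList.length : Int) > 44 <;>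
          simp [h1, h2, hb, ← String.length_toList] <;> omega
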